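-- pv_equiv track=rewrite | github.com/MuhammadMehdiRaza/AI_Semester_Project | AI_Project/data/generated_dataset/files/code_trans_59.py | pluperfect_number
-- ===== SOURCE A (Python) =====
-- def pluperfect_number(temp_8: int) -> bool:
--     """Return True if temp_8 is a pluperfect number or False if it is not
--
--     >>> all(pluperfect_number(temp_8) for temp_8 in temp_2)
--     True
--     >>> any(pluperfect_number(temp_8) for temp_8 in temp_1)
--     False
--     """
--     if not isinstance(temp_8, int) or temp_8 < 1:
--         return False
--
--     # Init a "histogram" of the digits
--     temp_4 = [0, 0, 0, 0, 0, 0, 0, 0, 0, 0]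
--     temp_5 = 0
--     temp_13 = 0
--     temp_12 = temp_8
--     while temp_12 > 0:
--         temp_12, temp_11 = divmod(temp_12, 10)
--         temp_4[temp_11] += 1
--         temp_5 += 1
--
--     for temp_3, temp_7 in zip(temp_4, range(len(temp_4))):
--         temp_13 += temp_3 * temp_7**temp_5
--
--     return temp_8 == temp_13
-- ===== SOURCE B (Python) =====
-- def pluperfect_number(temp_8: int) -> bool:
--     """Return True if temp_8 is a pluperfect (Armstrong) number, else False."""
--     if not isinstance(temp_8, int) or temp_8 < 1:
--         return False
--
--     def digits(n):
--         if n > 0: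
--             return [n % 10] + digits(n // 10)
--         return []
--
--     ds = digits(temp_8)
--     d = len(ds)
--     return temp_8 == sum(r ** d for r in ds)
-- ===== Notes on version B (the rewrite author's own statement) =====
-- stated objective: simpler
-- what changed: B extracts the digit list recursively and sums r**d over the digits directly, replacing A's ten-bucket histogram plus its weighted zip-with-range pass.
import Mathlib
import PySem

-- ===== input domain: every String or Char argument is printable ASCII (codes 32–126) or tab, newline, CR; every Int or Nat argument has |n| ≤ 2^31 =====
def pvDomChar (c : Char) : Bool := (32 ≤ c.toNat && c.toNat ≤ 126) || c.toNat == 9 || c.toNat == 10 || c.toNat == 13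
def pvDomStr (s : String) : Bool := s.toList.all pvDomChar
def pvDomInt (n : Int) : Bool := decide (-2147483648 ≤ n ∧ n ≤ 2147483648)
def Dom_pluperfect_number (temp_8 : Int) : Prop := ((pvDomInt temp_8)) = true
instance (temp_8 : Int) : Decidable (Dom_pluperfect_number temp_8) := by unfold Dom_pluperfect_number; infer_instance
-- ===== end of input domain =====

-- B replaces A's ten-bucket digit histogram (and its weighted zip(hist, range(10)) pass) by a
-- recursively built digit list summed directly; objective: simpler.

-- ===== PORT A =====
-- the while loop: divmod into a histogram (length-10 list) plus a digit counter
def pluperfectLoopA (n : Int) (hist : List Int) (cnt : Int) : List Int × Int :=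
  if h : 0 < n then
    pluperfectLoopA (PySem.Int.floordiv n 10)
      (PySem.List.pySetD hist (PySem.Int.mod n 10)
        (PySem.List.pyGetD hist (PySem.Int.mod n 10) 0 + 1))
      (cnt + 1)
  else (hist, cnt)
termination_by n.toNat
decreasing_by
  rw [PySem.Int.floordiv_eq_ediv_of_pos (by omega)]
  omega

def pluperfect_number (temp_8 : Int) : Bool :=
  if temp_8 < 1 then false
  else
    -- temp_5 (the digit count) is always ≥ 0, so temp_7 ** temp_5 is ported as ^ (·.toNat)
    let p := pluperfectLoopA temp_8 [0, 0, 0, 0, 0, 0, 0, 0, 0, 0] 0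
    let temp_13 :=
      (p.1.zip (PySem.List.pyRange 0 10 1)).foldl
        (fun acc q => acc + q.1 * q.2 ^ p.2.toNat) 0
    decide (temp_8 = temp_13)

-- ===== PORT B =====
-- digits(n): least-significant-first digit list, built recursively
def digitsB (n : Int) : List Int :=
  if _h : 0 < n then
    PySem.Int.mod n 10 :: digitsB (PySem.Int.floordiv n 10)
  else []
termination_by n.toNat
decreasing_by
  rw [PySem.Int.floordiv_eq_ediv_of_pos (by omega)]
  omega

def pluperfect_number_alt (temp_8 : Int) : Bool :=
  if temp_8 < 1 then false
  else
    let ds := digitsB temp_8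
    let d := ds.length
    decide (temp_8 = (ds.map (fun r => r ^ d)).sum)

-- ===== PRECONDITION & SPEC =====
def Spec_pluperfect_number (temp_8 : Int) (out : Bool) : Prop := out = pluperfect_number_alt temp_8
instance (temp_8 : Int) (out : Bool) : Decidable (Spec_pluperfect_number temp_8 out) := by unfold Spec_pluperfect_number; infer_instance

-- ===== CLAIM (what is proved, stated in full; the proofs are below) =====
def Claim_equal_pluperfect_number : Prop := ∀ (temp_8 : Int), Dom_pluperfect_number temp_8 → Spec_pluperfect_number temp_8 (pluperfect_number temp_8)

-- ===== LEMMAS AND PROOFS =====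

-- the weighted histogram sum A's second loop computes
def histSum (h : List Int) (e : Nat) : Int :=
  (h.zip (PySem.List.pyRange 0 10 1)).foldl (fun acc q => acc + q.1 * q.2 ^ e) 0

def incr (h : List Int) (r : Int) : List Int :=
  PySem.List.pySetD h r (PySem.List.pyGetD h r 0 + 1)

-- A's while loop is the fold of `incr` over B's digit list, and counts its length
theorem loopA_eq_digits (n : Int) (hist : List Int) (cnt : Int) :
    pluperfectLoopA n hist cnt =
      ((digitsB n).foldl incr hist, cnt + (digitsB n).length) := by
  induction n, hist, cnt using pluperfectLoopA.induct with
  | case1 n hist cnt h ih =>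
      rw [pluperfectLoopA, digitsB]
      simp only [h, dif_pos, ih, incr, List.foldl_cons, List.length_cons,
        Prod.mk.injEq]
      exact ⟨trivial, by push_cast; omega⟩
  | case2 n hist cnt h =>
      rw [pluperfectLoopA, digitsB]
      simp [h]

theorem digitsB_bounds (n : Int) : ∀ r ∈ digitsB n, 0 ≤ r ∧ r < 10 := by
  induction n using digitsB.induct with
  | case1 n h ih =>
      rw [digitsB]
      simp only [h, dif_pos, List.mem_cons]
      rintro r (rfl | hr)
      · rw [PySem.Int.mod_eq_emod_of_pos (by omega)]
        constructor
        · exact Int.emod_nonneg n (by omega)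
        · exact Int.emod_lt_of_pos n (by omega)
      · exact ih r hr
  | case2 n h =>
      rw [digitsB]; simp [h]

theorem length_incr (h : List Int) (r : Int) : (incr h r).length = h.length := by
  simp [incr, PySem.List.length_pySetD]

theorem histSum_incr (h : List Int) (hl : h.length = 10) (r : Int)
    (hr0 : 0 ≤ r) (hr10 : r < 10) (e : Nat) :
    histSum (incr h r) e = histSum h e + r ^ e := by
  have hR : PySem.List.pyRange 0 10 1 = [0, 1, 2, 3, 4, 5, 6, 7, 8, 9] := by decide
  rcases h with _ | ⟨a0, _ | ⟨a1, _ | ⟨a2, _ | ⟨a3, _ | ⟨a4, _ | ⟨a5, _ | ⟨a6, _ | ⟨a7, _ | ⟨a8, _ | ⟨a9, _ | ⟨a10, t⟩⟩⟩⟩⟩⟩⟩⟩⟩⟩⟩ <;>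
    simp only [List.length_nil, List.length_cons] at hl <;> try omega
  interval_cases r <;>
    simp [incr, histSum, hR, PySem.List.pySetD, PySem.List.pySet?, PySem.List.pyGetD,
      PySem.List.pyGet?, PySem.List.pyIdx?, List.set, List.zip, List.zipWith, List.foldl] <;>
    ring

theorem histSum_foldl (L : List Int) (h : List Int) (e : Nat)
    (hb : ∀ r ∈ L, 0 ≤ r ∧ r < 10) (hl : h.length = 10) :
    histSum (L.foldl incr h) e = histSum h e + (L.map (fun r => r ^ e)).sum := by
  induction L generalizing h with
  | nil => simp
  | cons x xs ih =>
      have hx := hb x (by simp)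
      rw [List.foldl_cons, ih _ (fun r hr => hb r (by simp [hr]))
        (by rw [length_incr, hl]),
        histSum_incr h hl x hx.1 hx.2 e]
      simp [List.map_cons, List.sum_cons]
      ring

theorem histSum_zeros (e : Nat) :
    histSum [0, 0, 0, 0, 0, 0, 0, 0, 0, 0] e = 0 := by
  have hR : PySem.List.pyRange 0 10 1 = [0, 1, 2, 3, 4, 5, 6, 7, 8, 9] := by decide
  simp [histSum, hR, List.zip, List.zipWith]

-- ===== VERDICT (by name: the statement is the Claim_ definition above) =====
theorem pluperfect_number_spec : Claim_equal_pluperfect_number := by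
  intro t _hDom
  unfold Spec_pluperfect_number pluperfect_number pluperfect_number_alt
  by_cases ht : t < 1
  · simp [ht]
  · simp only [ht, if_false]
    rw [loopA_eq_digits]
    have hcnt : ((0 : Int) + (digitsB t).length).toNat = (digitsB t).length := by
      omega
    have hsum := histSum_foldl (digitsB t) [0, 0, 0, 0, 0, 0, 0, 0, 0, 0]
      (digitsB t).length (digitsB_bounds t) (by rfl)
    rw [histSum_zeros] at hsum
    simp only [hcnt]
    show decide (t = histSum ((digitsB t).foldl incr _) (digitsB t).length) = _
    rw [hsum]
    simp
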